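-- pv_equiv track=rewrite | github.com/HmbleCreator/PhonoSemantics | paper-web/build_site.py | protect_math
-- ===== SOURCE A (Python) =====
-- def protect_math(text: str) -> tuple[str, list[str]]:
--     tokens: list[str] = []
--     output: list[str] = []
--     idx = 0
--
--     while idx < len(text):
--         if text.startswith(r"\(", idx):
--             end = text.find(r"\)", idx + 2)
--             if end != -1:
--                 tokens.append(text[idx + 2:end].strip())
--                 output.append(f"@@MATH{len(tokens) - 1}@@")
--                 idx = end + 2
--                 continue
--
--         if text[idx] == "$" and (idx == 0 or text[idx - 1] != "\\"):
--             end = idx + 1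
--             while end < len(text):
--                 if text[end] == "$" and text[end - 1] != "\\":
--                     break
--                 end += 1
--             if end < len(text):
--                 tokens.append(text[idx + 1:end].strip())
--                 output.append(f"@@MATH{len(tokens) - 1}@@")
--                 idx = end + 1
--                 continue
--
--         output.append(text[idx])
--         idx += 1
--
--     return "".join(output), tokens
-- ===== SOURCE B (Python) =====
-- import re
--
-- _MATH_RE = re.compile(r"\\\(.*?\\\)|(?<!\\)\$.*?(?<!\\)\$", re.DOTALL)
--
--
-- def protect_math(text: str) -> tuple[str, list[str]]:
--     tokens: list[str] = []
--
--     def repl(m: re.Match) -> str: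
--         s = m.group(0)
--         inner = s[2:-2] if s.startswith(r"\(") else s[1:-1]
--         tokens.append(inner.strip())
--         return f"@@MATH{len(tokens) - 1}@@"
--
--     return _MATH_RE.sub(repl, text), tokens
-- ===== Notes on version B (the rewrite author's own statement) =====
-- stated objective: idiomatic
-- what changed: replaces A's manual character-cursor while-loop (per-character output list, hand-rolled find/startswith calls and an inner escape-scanning while) with one compiled regex with alternation and DOTALL applied via re.sub and a token-collecting replacement callback
import Mathlib
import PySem

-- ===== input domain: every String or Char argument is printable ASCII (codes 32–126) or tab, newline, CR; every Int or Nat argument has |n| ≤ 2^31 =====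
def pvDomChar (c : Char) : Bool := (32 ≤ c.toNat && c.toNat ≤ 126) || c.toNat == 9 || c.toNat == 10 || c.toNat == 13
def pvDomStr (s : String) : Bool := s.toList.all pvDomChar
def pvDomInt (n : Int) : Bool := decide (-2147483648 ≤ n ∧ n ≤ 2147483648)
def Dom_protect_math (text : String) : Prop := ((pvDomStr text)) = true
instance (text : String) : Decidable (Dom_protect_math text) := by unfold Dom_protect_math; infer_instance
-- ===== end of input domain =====

-- B replaces A's manual character-cursor scan by one compiled regex (alternation `\\\(.*?\\\)|(?<!\\)\$.*?(?<!\\)\$`, DOTALL)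
-- applied with re.sub and a token-collecting callback; objective: idiomatic (and measurably faster via C-level matching).

-- ===== PORT A =====
-- A's inner `while end < len(text): if text[end] == "$" and text[end-1] != "\\": break; end += 1`,
-- returning the final `end`.  `text[end-1]` is ported as `cs[e-1]?.getD ' '` (exact: every call has 1 ≤ e,
-- so the index is in range and Python's plain indexing returns that char).
def pvFindDollarEnd (cs : List Char) (e : Nat) : Nat :=
  if h : e < cs.length then
    if cs[e] = '$' ∧ cs[e-1]?.getD ' ' ≠ '\\' then e
    else pvFindDollarEnd cs (e+1)
  else e
termination_by cs.length - e

theorem pvFindDollarEnd_ge (cs : List Char) (e : Nat) : e ≤ pvFindDollarEnd cs e := by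
  unfold pvFindDollarEnd
  split
  · split
    · exact Nat.le_refl e
    · exact Nat.le_trans (Nat.le_succ e) (pvFindDollarEnd_ge cs (e+1))
  · exact Nat.le_refl e
termination_by cs.length - e

-- termination helper for the `\( … \)` branch: the found position is at least idx + 2
theorem pvFindParen_lt (cs : List Char) (idx : Nat)
    (hs : PySem.Chars.startswith (List.drop idx cs) ['\\', '('] = true)
    (he : PySem.Chars.findFrom cs ['\\', ')'] ((idx : Int) + 2) none ≠ -1) :
    idx < (PySem.Chars.findFrom cs ['\\', ')'] ((idx : Int) + 2) none).toNat + 2 := by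
  have hk : idx + 2 ≤ cs.length := by
    have h1 := ((PySem.Chars.startswith_iff _ _).1 hs).length_le
    simp at h1; omega
  have hcast : ((idx : Int) + 2) = ((idx + 2 : Nat) : Int) := by push_cast; ring
  rw [hcast] at he ⊢
  have := (PySem.Chars.findFrom_natCast_spec cs ['\\', ')'] (idx + 2) hk he).1
  omega

-- the while-loop of A: state (idx, output, tokens); branches in A's order.  Python's fall-through
-- (`\(` seen but no `\)` found) is rendered by the conjunction in the first guard: on that path A's
-- `$`-test is false anyway (text[idx] = '\\') and the character branch runs, exactly as here.
def pvLoopA (cs : List Char) (idx : Nat) (output tokens : List (List Char)) :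
    List Char × List (List Char) :=
  if h : idx < cs.length then
    if hs : PySem.Chars.startswith (List.drop idx cs) ['\\', '('] = true ∧
            PySem.Chars.findFrom cs ['\\', ')'] ((idx : Int) + 2) none ≠ -1 then
      -- tokens.append(text[idx+2:end].strip()); output.append placeholder; idx = end + 2
      let e := PySem.Chars.findFrom cs ['\\', ')'] ((idx : Int) + 2) none
      let tokens' := tokens ++ [PySem.Chars.strip (PySem.List.slice cs (some ((idx : Int) + 2)) (some e))]
      pvLoopA cs (e.toNat + 2)
        (output ++ ["@@MATH".toList ++ PySem.Int.toChars ((tokens'.length : Int) - 1) ++ "@@".toList])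
        tokens'
    else if hd : cs[idx] = '$' ∧ (idx = 0 ∨ cs[idx-1]?.getD ' ' ≠ '\\') ∧
                 pvFindDollarEnd cs (idx+1) < cs.length then
      -- the inner scan found an unescaped closing '$'
      let e := pvFindDollarEnd cs (idx+1)
      let tokens' := tokens ++ [PySem.Chars.strip (PySem.List.slice cs (some ((idx : Int) + 1)) (some (e : Int)))]
      pvLoopA cs (e + 1)
        (output ++ ["@@MATH".toList ++ PySem.Int.toChars ((tokens'.length : Int) - 1) ++ "@@".toList])
        tokens'
    else
      pvLoopA cs (idx + 1) (output ++ [[cs[idx]]]) tokens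
  else (PySem.Chars.join [] output, tokens)
termination_by cs.length - idx
decreasing_by
  · have := pvFindParen_lt cs idx hs.1 hs.2; omega
  · have := pvFindDollarEnd_ge cs (idx+1); omega
  · omega

def protect_math (text : String) : String × List String :=
  let r := pvLoopA text.toList 0 [] []
  (String.ofList r.1, List.map String.ofList r.2)

-- ===== PORT B =====
-- the compiled pattern's first alternative after its literal `\(`: lazy `.*?` up to the first `\)`;
-- returns (content, rest after the `\)`), none if the alternative cannot complete
def pvMatchParen : List Char → Option (List Char × List Char)
  | [] => none
  | c :: rest =>
    if c = '\\' ∧ rest.head? = some ')' then some ([], rest.tail)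
    else (pvMatchParen rest).map (fun p => (c :: p.1, p.2))

-- the second alternative after its opening `$`: lazy `.*?` up to the first `$` that passes the
-- lookbehind `(?<!\\)`; an escaped `\$` is consumed into the lazy body
def pvMatchDollar : List Char → Option (List Char × List Char)
  | [] => none
  | c :: rest =>
    if c = '$' then some ([], rest)
    else if c = '\\' ∧ rest.head? = some '$' then
      (pvMatchDollar rest.tail).map (fun p => ('\\' :: '$' :: p.1, p.2))
    else (pvMatchDollar rest).map (fun p => (c :: p.1, p.2))
termination_by cs => cs.length
decreasing_by
  · simp [List.length_tail]
  · simp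

theorem pvMatchParen_rest_lt (t : List Char) (p : List Char × List Char)
    (h : pvMatchParen t = some p) : p.2.length < t.length := by
  fun_induction pvMatchParen t generalizing p with
  | case1 => simp at h
  | case2 c rest hc =>
    obtain rfl := (Option.some.inj h).symm
    have := @List.length_tail _ rest
    simp only [List.length_cons]
    omega
  | case3 c rest hc ih =>
    obtain ⟨q, hq, hfq⟩ := Option.map_eq_some_iff.1 h
    subst hfq
    have := ih q hq
    simp only [List.length_cons]
    omega

theorem pvMatchDollar_rest_lt (t : List Char) (p : List Char × List Char)
    (h : pvMatchDollar t = some p) : p.2.length < t.length := by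
  fun_induction pvMatchDollar t generalizing p with
  | case1 => simp at h
  | case2 rest =>
    obtain rfl := (Option.some.inj h).symm
    simp
  | case3 c rest hc1 hc2 ih =>
    obtain ⟨q, hq, hfq⟩ := Option.map_eq_some_iff.1 h
    subst hfq
    have := ih q hq
    have := @List.length_tail _ rest
    simp only [List.length_cons]
    omega
  | case4 c rest hc1 hc2 ih =>
    obtain ⟨q, hq, hfq⟩ := Option.map_eq_some_iff.1 h
    subst hfq
    have := ih q hq
    simp only [List.length_cons]
    omega

-- one attempt of the whole pattern at the current position; prevBS = "the previous character of the
-- original text is a backslash" (all the lookbehind ever asks)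
def pvTryMatch (prevBS : Bool) : List Char → Option (List Char × List Char)
  | [] => none
  | c :: rest =>
    if c = '\\' ∧ rest.head? = some '(' then pvMatchParen rest.tail
    else if c = '$' ∧ prevBS = false then pvMatchDollar rest
    else none

theorem pvTryMatch_rest_lt (prevBS : Bool) (t : List Char) (p : List Char × List Char)
    (h : pvTryMatch prevBS t = some p) : p.2.length < t.length := by
  cases t with
  | nil => simp [pvTryMatch] at h
  | cons c rest =>
    simp only [pvTryMatch] at h
    split_ifs at h with h1 h2
    · have := pvMatchParen_rest_lt _ _ h
      have := @List.length_tail _ rest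
      simp only [List.length_cons]
      omega
    · have := pvMatchDollar_rest_lt _ _ h
      simp only [List.length_cons]
      omega

-- re.sub's scan: at each position try the pattern; on a match emit the placeholder (the callback
-- appends the stripped content to tokens) and resume after the match, else copy one character
def pvSubB (cs : List Char) (prevBS : Bool) (tokens : List (List Char)) :
    List Char × List (List Char) :=
  match cs with
  | [] => ([], tokens)
  | c :: rest =>
    match h : pvTryMatch prevBS (c :: rest) with
    | some cr =>
      let tokens' := tokens ++ [PySem.Chars.strip cr.1]
      let res := pvSubB cr.2 false tokens'
      ("@@MATH".toList ++ PySem.Int.toChars ((tokens'.length : Int) - 1) ++ "@@".toList ++ res.1,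
       res.2)
    | none =>
      let res := pvSubB rest (c == '\\') tokens
      (c :: res.1, res.2)
termination_by cs.length
decreasing_by
  · exact pvTryMatch_rest_lt _ _ _ h
  · simp

def protect_math_alt (text : String) : String × List String :=
  let r := pvSubB text.toList false []
  (String.ofList r.1, List.map String.ofList r.2)

-- ===== PRECONDITION & SPEC =====
def Spec_protect_math (text : String) (out : String × List String) : Prop := out = protect_math_alt text
instance (text : String) (out : String × List String) : Decidable (Spec_protect_math text out) := by unfold Spec_protect_math; infer_instance

-- ===== CLAIM (what is proved, stated in full; the proofs are below) =====
def Claim_equal_protect_math : Prop := ∀ (text : String), Dom_protect_math text → Spec_protect_math text (protect_math text)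

-- ===== LEMMAS AND PROOFS =====

theorem pvJoinNil (l : List (List Char)) : PySem.Chars.join [] l = l.flatten := by
  induction l with
  | nil => rfl
  | cons x l ih => cases l <;> simp_all [PySem.Chars.join, List.intercalate, List.intersperse]

theorem pvMatchParen_none (t : List Char) (h : pvMatchParen t = none) :
    ∀ j, ¬ (['\\', ')'] <+: List.drop j t) := by
  fun_induction pvMatchParen t with
  | case1 => intro j; simp
  | case2 c rest hc => simp at h
  | case3 c rest hc ih =>
    have hr : pvMatchParen rest = none := Option.map_eq_none_iff.1 h
    intro j
    cases j with
    | zero =>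
      intro hp
      obtain ⟨s, hs⟩ := hp
      injection hs with hA hB
      exact hc ⟨hA.symm, by rw [← hB]; rfl⟩
    | succ j =>
      intro hp
      exact ih hr j (by simpa using hp)

theorem pvMatchParen_some (t c r : List Char) (h : pvMatchParen t = some (c, r)) :
    t = c ++ '\\' :: ')' :: r ∧ ∀ j < c.length, ¬ (['\\', ')'] <+: List.drop j t) := by
  fun_induction pvMatchParen t generalizing c r with
  | case1 => simp at h
  | case2 c0 rest hc =>
    obtain ⟨hc1, hc2⟩ := hc
    subst hc1
    obtain ⟨h1, h2⟩ := Prod.mk.injEq .. ▸ Option.some.inj h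
    subst h1; subst h2
    obtain ⟨t0, ht0⟩ : ∃ t0, rest = ')' :: t0 := by
      cases rest with
      | nil => simp at hc2
      | cons a t0 => simp at hc2; subst hc2; exact ⟨t0, rfl⟩
    refine ⟨by simp [ht0], by intro j hj; simp at hj⟩
  | case3 c0 rest hc ih =>
    obtain ⟨q, hq, hfq⟩ := Option.map_eq_some_iff.1 h
    obtain ⟨h1, h2⟩ := Prod.mk.injEq .. ▸ hfq
    subst h1; subst h2
    obtain ⟨ht, hmin⟩ := ih q.1 q.2 (by simpa using hq)
    refine ⟨by simp [ht], ?_⟩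
    intro j hj
    cases j with
    | zero =>
      intro hp
      obtain ⟨s, hs⟩ := hp
      injection hs with hA hB
      exact hc ⟨hA.symm, by rw [← hB]; rfl⟩
    | succ j =>
      intro hp
      exact hmin j (by simpa using hj) (by simpa using hp)

theorem pvMatchParen_isSome_of_prefix (t : List Char) (j : Nat)
    (h : ['\\', ')'] <+: List.drop j t) : pvMatchParen t ≠ none := by
  intro hn
  exact pvMatchParen_none t hn j h

-- the `\(…\)` correspondence: A's find and B's lazy scan agree
theorem pvParenBridge (cs : List Char) (idx : Nat) (hk : idx + 2 ≤ cs.length)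
    (he : PySem.Chars.findFrom cs ['\\', ')'] (((idx + 2 : Nat) : Int)) none ≠ -1) :
    pvMatchParen (List.drop (idx+2) cs) =
      some (List.take ((PySem.Chars.findFrom cs ['\\', ')'] (((idx + 2 : Nat) : Int)) none).toNat - (idx+2)) (List.drop (idx+2) cs),
            List.drop ((PySem.Chars.findFrom cs ['\\', ')'] (((idx + 2 : Nat) : Int)) none).toNat + 2) cs) := by
  classical
  set e := PySem.Chars.findFrom cs ['\\', ')'] (((idx + 2 : Nat) : Int)) none with hedef
  obtain ⟨hge, hpre, hmin⟩ := PySem.Chars.findFrom_natCast_spec cs ['\\', ')'] (idx + 2) hk he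
  rw [← hedef] at hge hpre hmin
  have hge' : idx + 2 ≤ e.toNat := by omega
  have hlen : e.toNat + 2 ≤ cs.length := by
    have := hpre.length_le
    simp [List.length_drop] at this
    omega
  have hj : ['\\', ')'] <+: List.drop (e.toNat - (idx+2)) (List.drop (idx+2) cs) := by
    rw [List.drop_drop, show idx + 2 + (e.toNat - (idx+2)) = e.toNat from by omega]
    exact hpre
  cases hm : pvMatchParen (List.drop (idx+2) cs) with
  | none => exact absurd hm (pvMatchParen_isSome_of_prefix _ (e.toNat - (idx+2)) hj)
  | some p =>
    obtain ⟨ht, hminB⟩ := pvMatchParen_some _ p.1 p.2 (by simpa using hm)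
    have hplen : idx + 2 + p.1.length + 2 ≤ cs.length := by
      have := congrArg List.length ht
      simp [List.length_drop] at this
      omega
    have h1 : ¬ (e.toNat - (idx+2) < p.1.length) := fun hlt => hminB _ hlt hj
    have hpre2 : ['\\', ')'] <+: List.drop (idx+2+p.1.length) cs := by
      have hdd : List.drop (idx+2+p.1.length) cs = List.drop p.1.length (List.drop (idx+2) cs) := by
        rw [List.drop_drop]
      rw [hdd, ht, List.drop_left]
      exact ⟨p.2, rfl⟩
    have h2 : ¬ (idx+2+p.1.length < e.toNat) := fun hlt => hmin _ (by omega) hlt hpre2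
    have hlenq : p.1.length = e.toNat - (idx+2) := by omega
    have htake : List.take (e.toNat - (idx+2)) (List.drop (idx+2) cs) = p.1 := by
      rw [← hlenq, ht, List.take_left]
    have hdropr : List.drop (e.toNat + 2) cs = p.2 := by
      have h3 : e.toNat + 2 = (idx + 2) + (p.1.length + 2) := by omega
      rw [h3, ← List.drop_drop, ht]
      have h4 : p.1 ++ '\\' :: ')' :: p.2 = (p.1 ++ ['\\', ')']) ++ p.2 := by simp
      rw [h4, List.drop_left' (by simp)]
    rw [htake, hdropr]

-- the `$…$` correspondence: A's inner while and B's lazy scan agree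
theorem pvDollarBridge (cs : List Char) (e : Nat) (h1 : 1 ≤ e) (h2 : e ≤ cs.length)
    (hg : ¬ (cs[e-1]? = some '\\' ∧ cs[e]? = some '$')) :
    pvMatchDollar (List.drop e cs) =
      if pvFindDollarEnd cs e < cs.length then
        some (List.take (pvFindDollarEnd cs e - e) (List.drop e cs),
              List.drop (pvFindDollarEnd cs e + 1) cs)
      else none := by
  by_cases hlt : e < cs.length
  case neg =>
    have hf : pvFindDollarEnd cs e = e := by rw [pvFindDollarEnd]; simp [hlt]
    rw [hf, if_neg hlt, List.drop_of_length_le (by omega)]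
    simp [pvMatchDollar]
  case pos =>
    have hdrop : List.drop e cs = cs[e] :: List.drop (e+1) cs := List.drop_eq_getElem_cons hlt
    by_cases hc : cs[e] = '$'
    · have hprev : ¬ (cs[e-1]?.getD ' ' = '\\') := by
        intro hbad
        apply hg
        have h1lt : e - 1 < cs.length := by omega
        rw [List.getElem?_eq_getElem h1lt] at hbad ⊢
        simp at hbad
        simp [hbad, List.getElem?_eq_getElem hlt, hc]
      have hf : pvFindDollarEnd cs e = e := by
        rw [pvFindDollarEnd]; simp [hlt, hc, hprev]
      rw [hdrop, hc, hf, if_pos hlt]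
      simp [pvMatchDollar]
    · by_cases hc2 : cs[e] = '\\' ∧ cs[e+1]? = some '$'
      · obtain ⟨he1, hval⟩ := List.getElem?_eq_some_iff.1 hc2.2
        have hdrop2 : List.drop (e+1) cs = cs[e+1] :: List.drop (e+2) cs := List.drop_eq_getElem_cons he1
        have hf1 : pvFindDollarEnd cs e = pvFindDollarEnd cs (e+1) := by
          rw [pvFindDollarEnd]; simp [hlt, hc]
        have hf2 : pvFindDollarEnd cs (e+1) = pvFindDollarEnd cs (e+2) := by
          rw [pvFindDollarEnd]
          simp [he1, hval, List.getElem?_eq_getElem hlt, hc2.1]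
        have hguard2 : ¬ (cs[e+2-1]? = some '\\' ∧ cs[e+2]? = some '$') := by
          intro hx
          have : cs[e+1]? = some '\\' := by simpa using hx.1
          rw [hc2.2] at this
          simp at this
        have ih := pvDollarBridge cs (e+2) (by omega) (by omega) hguard2
        have hge2 : e + 2 ≤ pvFindDollarEnd cs (e+2) := pvFindDollarEnd_ge cs (e+2)
        have hfe : pvFindDollarEnd cs e = pvFindDollarEnd cs (e+2) := hf1.trans hf2
        rw [hdrop, hc2.1, hdrop2, hval]
        have hred : pvMatchDollar ('\\' :: '$' :: List.drop (e+2) cs) =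
            Option.map (fun p => ('\\' :: '$' :: p.1, p.2)) (pvMatchDollar (List.drop (e+2) cs)) := by
          simp [pvMatchDollar]
        rw [hred, ih, hfe]
        by_cases hflen : pvFindDollarEnd cs (e+2) < cs.length
        · rw [if_pos hflen, if_pos hflen]
          rw [show pvFindDollarEnd cs (e+2) - e = (pvFindDollarEnd cs (e+2) - (e+2)) + 1 + 1 from by omega]
          rw [List.take_succ_cons, List.take_succ_cons]
          rfl
        · rw [if_neg hflen, if_neg hflen]
          rfl
      · have hf1 : pvFindDollarEnd cs e = pvFindDollarEnd cs (e+1) := by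
          rw [pvFindDollarEnd]; simp [hlt, hc]
        have hguard1 : ¬ (cs[e+1-1]? = some '\\' ∧ cs[e+1]? = some '$') := by
          intro hx
          apply hc2
          have : cs[e]? = some '\\' := by simpa using hx.1
          rw [List.getElem?_eq_getElem hlt] at this
          simp at this
          exact ⟨this, hx.2⟩
        have ih := pvDollarBridge cs (e+1) (by omega) (by omega) hguard1
        have hge1 : e + 1 ≤ pvFindDollarEnd cs (e+1) := pvFindDollarEnd_ge cs (e+1)
        rw [hdrop]
        have hred : pvMatchDollar (cs[e] :: List.drop (e+1) cs) =
            Option.map (fun p => (cs[e] :: p.1, p.2)) (pvMatchDollar (List.drop (e+1) cs)) := by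
          simp only [pvMatchDollar]
          rw [if_neg hc, if_neg (by rw [List.head?_drop]; intro hx; exact hc2 ⟨hx.1, hx.2⟩)]
        rw [hred, ih, hf1]
        by_cases hflen : pvFindDollarEnd cs (e+1) < cs.length
        · rw [if_pos hflen, if_pos hflen]
          rw [show pvFindDollarEnd cs (e+1) - e = (pvFindDollarEnd cs (e+1) - (e+1)) + 1 from by omega]
          rw [List.take_succ_cons]
          rfl
        · rw [if_neg hflen, if_neg hflen]
          rfl
termination_by cs.length - e
decreasing_by
  · omega
  · omega

theorem pvFindDollarEnd_stop (cs : List Char) (e : Nat)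
    (h : pvFindDollarEnd cs e < cs.length) :
    cs[pvFindDollarEnd cs e]? = some '$' := by
  fun_induction pvFindDollarEnd cs e with
  | case1 e hlt hcond => simp [List.getElem?_eq_getElem hlt, hcond.1]
  | case2 e hlt hcond ih => exact ih h
  | case3 e hnlt => exact absurd h hnlt

def pvPrevBS (cs : List Char) (idx : Nat) : Bool := decide (idx ≠ 0 ∧ cs[idx-1]? = some '\\')

theorem pvPrevBS_succ (cs : List Char) (idx : Nat) (h : idx < cs.length) :
    pvPrevBS cs (idx+1) = (cs[idx] == '\\') := by
  unfold pvPrevBS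
  by_cases hc : cs[idx] = '\\' <;> simp [List.getElem?_eq_getElem h, hc]

theorem pvPrevBS_eq_false (cs : List Char) (m : Nat) (x : Char) (hx : cs[m]? = some x)
    (hne : x ≠ '\\') : pvPrevBS cs (m+1) = false := by
  unfold pvPrevBS
  simp [hx, hne]

theorem pvJoinSnoc (output : List (List Char)) (x y : List Char) :
    PySem.Chars.join [] (output ++ [x]) ++ y = PySem.Chars.join [] output ++ (x ++ y) := by
  simp [pvJoinNil]

theorem pvBridge (cs : List Char) (idx : Nat) (hidx : idx ≤ cs.length)
    (output tokens : List (List Char)) :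
    pvLoopA cs idx output tokens =
      (PySem.Chars.join [] output ++ (pvSubB (List.drop idx cs) (pvPrevBS cs idx) tokens).1,
       (pvSubB (List.drop idx cs) (pvPrevBS cs idx) tokens).2) := by
  rw [pvLoopA]
  by_cases h : idx < cs.length
  case neg =>
    rw [dif_neg h, List.drop_of_length_le (by omega), pvSubB]
    simp
  case pos =>
    rw [dif_pos h]
    have hdrop : List.drop idx cs = cs[idx] :: List.drop (idx+1) cs := List.drop_eq_getElem_cons h
    by_cases hs : PySem.Chars.startswith (List.drop idx cs) ['\\', '('] = true
    · -- the text has "\(" at idx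
      obtain ⟨s0, hs0⟩ := (PySem.Chars.startswith_iff _ _).1 hs
      rw [hdrop] at hs0
      injection hs0 with hA hB
      have hci : cs[idx] = '\\' := hA.symm
      have hd1 : List.drop (idx+1) cs = '(' :: s0 := hB.symm
      have hd2 : List.drop (idx+2) cs = s0 := by
        have ht : List.drop (idx+2) cs = (List.drop (idx+1) cs).tail := by
          rw [List.tail_drop]
        rw [ht, hd1, List.tail_cons]
      have hk : idx + 2 ≤ cs.length := by
        have := congrArg List.length hd1
        simp [List.length_drop] at this
        omega
      have hcast : ((idx : Int) + 2) = (((idx + 2 : Nat)) : Int) := by push_cast; ring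
      have htmeq : pvTryMatch (pvPrevBS cs idx) (List.drop idx cs) = pvMatchParen (List.drop (idx+2) cs) := by
        rw [hdrop, hd1]
        simp only [pvTryMatch]
        rw [if_pos ⟨hci, rfl⟩, List.tail_cons, hd2]
      by_cases he : PySem.Chars.findFrom cs ['\\', ')'] ((idx : Int) + 2) none = -1
      · -- "\)" not found: Python falls through and emits the single character
        rw [dif_neg (by simp [hs, he])]
        rw [dif_neg (by intro hd; rw [hci] at hd; exact absurd hd.1 (by decide))]
        have hmp : pvMatchParen (List.drop (idx+2) cs) = none := by
          rw [hcast] at he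
          cases hmp2 : pvMatchParen (List.drop (idx+2) cs) with
          | none => rfl
          | some p =>
            have hsp := pvMatchParen_some _ p.1 p.2 (by simpa using hmp2)
            have hinf : ['\\', ')'] <:+: List.drop (idx+2) cs :=
              ⟨p.1, p.2, by rw [hsp.1]; simp⟩
            exact absurd hinf ((PySem.Chars.findFrom_natCast_eq_neg_one_iff cs _ (idx+2) hk).1 he)
        rw [pvBridge cs (idx+1) (by omega) _ _]
        conv_rhs => rw [hdrop, pvSubB]
        rw [← hdrop]
        split
        next cr heq => rw [htmeq, hmp] at heq; exact absurd heq (by simp)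
        next heq =>
          rw [pvPrevBS_succ cs idx h, pvJoinSnoc]
          simp
      · -- found: both sides consume the whole \( … \) span
        rw [dif_pos ⟨hs, he⟩]
        rw [hcast] at he ⊢
        have hpb := pvParenBridge cs idx hk he
        obtain ⟨hge, hpre, hmin⟩ := PySem.Chars.findFrom_natCast_spec cs ['\\', ')'] (idx+2) hk he
        have hge' : idx + 2 ≤ (PySem.Chars.findFrom cs ['\\', ')'] (((idx+2 : Nat) : Int)) none).toNat := by omega
        have hlen2 : (PySem.Chars.findFrom cs ['\\', ')'] (((idx+2 : Nat) : Int)) none).toNat + 2 ≤ cs.length := by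
          have hl : 2 ≤ cs.length - (PySem.Chars.findFrom cs ['\\', ')'] (((idx+2 : Nat) : Int)) none).toNat := by
            simpa using hpre.length_le
          omega
        rw [pvBridge cs ((PySem.Chars.findFrom cs ['\\', ')'] (((idx+2 : Nat) : Int)) none).toNat + 2) hlen2 _ _]
        have hcl : cs[(PySem.Chars.findFrom cs ['\\', ')'] (((idx+2 : Nat) : Int)) none).toNat + 1]? = some ')' := by
          obtain ⟨t, htp⟩ := hpre
          have h1 : (List.drop (PySem.Chars.findFrom cs ['\\', ')'] (((idx+2 : Nat) : Int)) none).toNat cs)[1]? = some ')' := by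
            rw [← htp]; rfl
          rw [List.getElem?_drop] at h1
          exact h1
        rw [show (PySem.Chars.findFrom cs ['\\', ')'] (((idx+2 : Nat) : Int)) none).toNat + 2
              = ((PySem.Chars.findFrom cs ['\\', ')'] (((idx+2 : Nat) : Int)) none).toNat + 1) + 1 from by omega,
            pvPrevBS_eq_false cs _ ')' hcl (by decide)]
        conv_rhs => rw [hdrop, pvSubB]
        rw [← hdrop]
        split
        next cr heq =>
          rw [htmeq, hpb] at heq
          obtain rfl := Option.some.inj heq
          have hsl : PySem.List.slice cs (some ((idx+2 : Nat) : Int))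
                (some (PySem.Chars.findFrom cs ['\\', ')'] (((idx+2 : Nat) : Int)) none))
              = List.take ((PySem.Chars.findFrom cs ['\\', ')'] (((idx+2 : Nat) : Int)) none).toNat - (idx+2)) (List.drop (idx+2) cs) := by
            obtain ⟨m, hm⟩ : ∃ m : Nat, PySem.Chars.findFrom cs ['\\', ')'] (((idx+2 : Nat) : Int)) none = (m : Int) :=
              ⟨(PySem.Chars.findFrom cs ['\\', ')'] (((idx+2 : Nat) : Int)) none).toNat, by omega⟩
            rw [hm, PySem.List.slice_natCast, Int.toNat_natCast]
          rw [hsl, pvJoinSnoc]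
        next heq =>
          rw [htmeq, hpb] at heq
          exact absurd heq (by simp)
    · -- no "\(" here
      have hnp : ¬ (cs[idx] = '\\' ∧ (List.drop (idx+1) cs).head? = some '(') := by
        intro hx
        apply hs
        rw [PySem.Chars.startswith_iff]
        obtain ⟨t, ht⟩ : ∃ t, List.drop (idx+1) cs = '(' :: t := by
          cases hdd : List.drop (idx+1) cs with
          | nil => rw [hdd] at hx; simp at hx
          | cons a t =>
            rw [hdd] at hx
            simp at hx
            exact ⟨t, by rw [hx.2]⟩
        rw [hdrop, ht, hx.1]
        exact ⟨t, rfl⟩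
      rw [dif_neg (by simp [hs])]
      by_cases hdol : cs[idx] = '$' ∧ (idx = 0 ∨ cs[idx-1]?.getD ' ' ≠ '\\')
      · -- an unescaped '$' opener
        have hpfalse : pvPrevBS cs idx = false := by
          unfold pvPrevBS
          simp only [decide_eq_false_iff_not]
          intro hx
          rcases hdol.2 with h0 | hne
          · exact hx.1 h0
          · exact hne (by rw [hx.2]; rfl)
        have hguard : ¬ (cs[idx+1-1]? = some '\\' ∧ cs[idx+1]? = some '$') := by
          intro hx
          have hx1 : cs[idx]? = some '\\' := by simpa using hx.1
          rw [List.getElem?_eq_getElem h, hdol.1] at hx1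
          simp at hx1
        have hdb := pvDollarBridge cs (idx+1) (by omega) (by omega) hguard
        have htm2 : pvTryMatch (pvPrevBS cs idx) (List.drop idx cs) = pvMatchDollar (List.drop (idx+1) cs) := by
          rw [hdrop]
          simp only [pvTryMatch]
          rw [if_neg (by intro hx; exact hnp ⟨hx.1, hx.2⟩), if_pos ⟨hdol.1, hpfalse⟩]
        by_cases hfl : pvFindDollarEnd cs (idx+1) < cs.length
        · -- closing '$' found
          rw [dif_pos ⟨hdol.1, hdol.2, hfl⟩]
          rw [pvBridge cs (pvFindDollarEnd cs (idx+1) + 1) (by omega) _ _]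
          have hstop := pvFindDollarEnd_stop cs (idx+1) hfl
          rw [pvPrevBS_eq_false cs _ '$' hstop (by decide)]
          conv_rhs => rw [hdrop, pvSubB]
          rw [← hdrop]
          split
          next cr heq =>
            rw [htm2, hdb, if_pos hfl] at heq
            obtain rfl := Option.some.inj heq
            have hsl : PySem.List.slice cs (some ((idx : Int) + 1)) (some ((pvFindDollarEnd cs (idx+1) : Nat) : Int))
                = List.take (pvFindDollarEnd cs (idx+1) - (idx+1)) (List.drop (idx+1) cs) := by
              rw [show ((idx : Int) + 1) = (((idx+1 : Nat)) : Int) from by push_cast; ring]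
              rw [PySem.List.slice_natCast]
            rw [hsl, pvJoinSnoc]
          next heq =>
            rw [htm2, hdb, if_pos hfl] at heq
            simp at heq
        · -- no closing '$': emit the character
          rw [dif_neg (by intro hx; exact hfl hx.2.2)]
          rw [pvBridge cs (idx+1) (by omega) _ _]
          conv_rhs => rw [hdrop, pvSubB]
          rw [← hdrop]
          split
          next cr heq =>
            rw [htm2, hdb, if_neg hfl] at heq
            simp at heq
          next heq =>
            rw [pvPrevBS_succ cs idx h, pvJoinSnoc]
            simp
      · -- plain character (including an escaped '$')
        rw [dif_neg (by intro hx; exact hdol ⟨hx.1, hx.2.1⟩)]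
        rw [pvBridge cs (idx+1) (by omega) _ _]
        have htm3 : pvTryMatch (pvPrevBS cs idx) (List.drop idx cs) = none := by
          rw [hdrop]
          simp only [pvTryMatch]
          rw [if_neg (by intro hx; exact hnp ⟨hx.1, hx.2⟩)]
          rw [if_neg ?_]
          intro hx
          apply hdol
          refine ⟨hx.1, ?_⟩
          have hx2 : ¬ (idx ≠ 0 ∧ cs[idx-1]? = some '\\') := by
            simpa [pvPrevBS] using hx.2
          by_cases h0 : idx = 0
          · exact Or.inl h0
          · right
            intro hbad
            apply hx2
            refine ⟨h0, ?_⟩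
            cases hgd : cs[idx-1]? with
            | none => rw [hgd] at hbad; exact absurd hbad (by decide)
            | some a =>
              rw [hgd] at hbad
              simp at hbad
              rw [hbad]
        conv_rhs => rw [hdrop, pvSubB]
        rw [← hdrop]
        split
        next cr heq => rw [htm3] at heq; simp at heq
        next heq =>
          rw [pvPrevBS_succ cs idx h, pvJoinSnoc]
          simp
termination_by cs.length - idx
decreasing_by
  · omega
  · have h2 := pvFindParen_lt cs idx hs (by rw [hcast]; exact he)
    have h3 := h2
    rw [hcast] at h3
    omega
  · have := pvFindDollarEnd_ge cs (idx+1)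
    omega
  · omega
  · omega

-- ===== VERDICT (by name: the statement is the Claim_ definition above) =====
theorem protect_math_spec : Claim_equal_protect_math := by
  intro text _
  unfold Spec_protect_math protect_math protect_math_alt
  have h := pvBridge text.toList 0 (Nat.zero_le _) [] []
  simp [pvPrevBS] at h
  simp [h]
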